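-- pv_equiv track=rewrite | github.com/sharma-anubhav/CrackingTheCodingInterview-DSA | ch38(SlidingWindow)/38.3.py | bestseller
-- ===== SOURCE A (Python) =====
-- from collections import defaultdict, deque
--
-- class Window:
--     def __init__(self, l, r):
--         self.l = l
--         self.r = r
--         self.internal = defaultdict(int)
--
-- def bestseller(arr, k):
--     cur_window = Window(0,0)
--     while cur_window.r< len(arr):
--         cur_window.internal[arr[cur_window.r]]+=1
--         cur_window.r+=1
--         if cur_window.r-cur_window.l == k:
--             if len(cur_window.internal.keys())==k:
--                 return True
--             cur_window.internal[arr[cur_window.l]]-=1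
--             if cur_window.internal[arr[cur_window.l]] == 0:
--                 del cur_window.internal[arr[cur_window.l]]
--             cur_window.l+=1
--     return False
-- ===== SOURCE B (Python) =====
-- def bestseller(arr, k):
--     if k <= 0:
--         return False
--     return any(len(set(arr[i:i+k])) == k for i in range(len(arr) - k + 1))
-- ===== Notes on version B (the rewrite author's own statement) =====
-- stated objective: simpler
-- what changed: Replaces A's single-pass sliding window with a rolling count dict (increment on entry, decrement/delete on exit, key-count check) by a two-line idiomatic form: guard k <= 0, then any() over each length-k window built and deduplicated independently via set().
import Mathlib
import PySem

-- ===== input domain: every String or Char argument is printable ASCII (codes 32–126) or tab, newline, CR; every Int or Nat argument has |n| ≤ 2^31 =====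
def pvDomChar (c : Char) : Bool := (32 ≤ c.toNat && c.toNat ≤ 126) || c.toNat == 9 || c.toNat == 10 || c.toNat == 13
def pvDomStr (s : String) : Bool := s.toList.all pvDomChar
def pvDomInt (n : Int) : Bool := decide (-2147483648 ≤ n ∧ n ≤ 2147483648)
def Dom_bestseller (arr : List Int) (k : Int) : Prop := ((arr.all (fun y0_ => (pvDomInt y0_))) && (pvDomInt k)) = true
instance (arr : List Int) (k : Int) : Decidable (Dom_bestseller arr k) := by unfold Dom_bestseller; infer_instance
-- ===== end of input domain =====

-- B replaces A's one-pass rolling count-dict sliding window by the idiomatic form: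
-- guard k <= 0, then any() over each length-k window's set built independently (simpler, not faster).

-- ===== PORT A =====
-- A's while loop, ported as recursion on arr.length - r. Python ints l, r are ports' Nat
-- counters (both start at 0 and only ever increase); arr[r] / arr[l] are read with pyGetD
-- (exact: the loop guarantees l ≤ r < len(arr) at each access).
def bestsellerGo (arr : List Int) (k : Int) (l r : Nat) (d : PySem.Dict Int Int) : Bool :=
  if h : r < arr.length then
    -- cur_window.internal[arr[cur_window.r]] += 1 ; cur_window.r += 1
    let d1 := d.modify (PySem.List.pyGetD arr (r : Int) 0) 0 (· + 1)
    if ((r : Int) + 1) - (l : Int) = k then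
      if (d1.keys.length : Int) = k then true
      else
        let x := PySem.List.pyGetD arr (l : Int) 0
        let d2 := d1.modify x 0 (· - 1)
        let d3 := if d2.getD x 0 = 0 then d2.erase x else d2
        bestsellerGo arr k (l + 1) (r + 1) d3
    else bestsellerGo arr k l (r + 1) d1
  else false
termination_by arr.length - r

def bestseller (arr : List Int) (k : Int) : Bool :=
  bestsellerGo arr k 0 0 PySem.Dict.empty

-- ===== PORT B =====
def bestseller_alt (arr : List Int) (k : Int) : Bool :=
  if k ≤ 0 then false
  else (PySem.List.pyRange 0 ((arr.length : Int) - k + 1) 1).any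
    (fun i => ((PySem.Set.ofList (PySem.List.slice arr (some i) (some (i + k)))).length : Int) == k)

-- ===== PRECONDITION & SPEC =====
def Spec_bestseller (arr : List Int) (k : Int) (out : Bool) : Prop := out = bestseller_alt arr k
instance (arr : List Int) (k : Int) (out : Bool) : Decidable (Spec_bestseller arr k out) := by unfold Spec_bestseller; infer_instance

-- ===== CLAIM (what is proved, stated in full; the proofs are below) =====
def Claim_equal_bestseller : Prop := ∀ (arr : List Int) (k : Int), Dom_bestseller arr k → Spec_bestseller arr k (bestseller arr k)

-- ===== LEMMAS AND PROOFS =====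

-- Abstraction of A's rolling dict: it is exactly a multiplicity table of the current window w.
def DInv (d : PySem.Dict Int Int) (w : List Int) : Prop :=
  d.keys.Nodup ∧ (∀ x : Int, d.getD x 0 = (w.count x : Int)) ∧ (∀ x : Int, x ∈ d.keys ↔ x ∈ w)

-- keys of an invariant dict are a permutation of set(w), so their number is |set(w)|
lemma keys_length_of_DInv (d : PySem.Dict Int Int) (w : List Int) (h : DInv d w) :
    d.keys.length = (PySem.Set.ofList w).length := by
  obtain ⟨hnd, _, hmem⟩ := h
  refine List.Perm.length_eq ?_
  refine (List.perm_ext_iff_of_nodup hnd (PySem.Set.nodup_ofList w)).mpr ?_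
  intro x
  rw [hmem x, PySem.Set.mem_ofList]

-- |set(w)| = |w| iff w has no duplicates
lemma ofList_length_eq_iff (w : List Int) :
    (PySem.Set.ofList w).length = w.length ↔ w.Nodup := by
  constructor
  · intro h
    have hperm : (PySem.Set.ofList w).Perm w.dedup := by
      refine (List.perm_ext_iff_of_nodup (PySem.Set.nodup_ofList w) w.nodup_dedup).mpr ?_
      intro x; rw [PySem.Set.mem_ofList, List.mem_dedup]
    have hd : w.dedup.length = w.length := by rw [← hperm.length_eq]; exact h
    have heq := List.Sublist.eq_of_length (List.dedup_sublist w) hd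
    rw [← heq]; exact w.nodup_dedup
  · intro h; rw [PySem.Set.ofList_eq_self_of_nodup w h]

lemma DInv_push (d : PySem.Dict Int Int) (w : List Int) (x : Int) (h : DInv d w) :
    DInv (d.modify x 0 (· + 1)) (w ++ [x]) := by
  obtain ⟨hnd, hcnt, hmem⟩ := h
  simp only [DInv, PySem.Dict.modify]
  refine ⟨PySem.Dict.nodup_keys_insert _ _ _ hnd, ?_, ?_⟩
  · intro y
    rw [PySem.Dict.getD_insert]
    by_cases hy : y = x
    · subst hy; simp [hcnt y, List.count_append]
    · simp [hy, hcnt y, List.count_append, List.count_singleton]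
      omega
  · intro y
    rw [PySem.Dict.mem_keys_insert]
    simp [hmem y, List.mem_append]
    tauto

-- (d.erase x) read back pointwise (erase filters the items list)
lemma find?_filter_ne_key (l : List (Int × Int)) (x y : Int) (h : y ≠ x) :
    List.find? (fun p => p.1 == y) (l.filter (fun p => !(p.1 == x))) =
      List.find? (fun p => p.1 == y) l := by
  induction l with
  | nil => rfl
  | cons p rest ih =>
    by_cases hp : p.1 = x
    · have hxy : (x == y) = false := by simp; omega
      simp [hp, hxy, ih]
    · by_cases hpy : p.1 = y
      · have hyx : ¬ (y = x) := h
        simp [hpy, hyx]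
      · simp [hp, hpy, ih]

lemma get?_erase (d : PySem.Dict Int Int) (x y : Int) :
    (d.erase x).get? y = if y = x then none else d.get? y := by
  simp only [PySem.Dict.erase, PySem.Dict.get?]
  by_cases hy : y = x
  · subst hy
    rw [if_pos rfl, List.find?_eq_none.mpr ?_]
    · rfl
    · intro p hp
      simp only [List.mem_filter] at hp
      simpa using hp.2
  · rw [if_neg hy, find?_filter_ne_key _ _ _ hy]

lemma getD_erase (d : PySem.Dict Int Int) (x y : Int) :
    (d.erase x).getD y 0 = if y = x then 0 else d.getD y 0 := by
  simp only [PySem.Dict.getD, get?_erase]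
  split <;> simp

lemma keys_erase (d : PySem.Dict Int Int) (x : Int) :
    (d.erase x).keys = d.keys.filter (fun y => !(y == x)) := by
  obtain ⟨items⟩ := d
  simp only [PySem.Dict.erase, PySem.Dict.keys]
  induction items with
  | nil => simp
  | cons p rest ih => by_cases hp : p.1 = x <;> simp [hp, ih]

lemma mem_keys_erase (d : PySem.Dict Int Int) (x y : Int) :
    y ∈ (d.erase x).keys ↔ y ∈ d.keys ∧ y ≠ x := by
  rw [keys_erase]; simp

lemma DInv_pop (d : PySem.Dict Int Int) (w : List Int) (x : Int) (h : DInv d (x :: w)) :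
    DInv (if (d.modify x 0 (· - 1)).getD x 0 = 0
          then (d.modify x 0 (· - 1)).erase x else d.modify x 0 (· - 1)) w := by
  obtain ⟨hnd, hcnt, hmem⟩ := h
  have hxmem : x ∈ d.keys := (hmem x).mpr (List.mem_cons_self)
  have hcont : d.contains x = true := (PySem.Dict.contains_iff_mem_keys d x).mpr hxmem
  have hk2 : (d.modify x 0 (· - 1)).keys = d.keys := by
    simp only [PySem.Dict.modify]
    exact PySem.Dict.keys_insert_of_contains d _ hcont
  have hg2 : ∀ y : Int, (d.modify x 0 (· - 1)).getD y 0 = (w.count y : Int) := by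
    intro y
    rw [PySem.Dict.getD_modify]
    by_cases hy : y = x
    · subst hy
      rw [hcnt y, List.count_cons_self]
      rw [if_pos rfl]
      push_cast
      ring
    · rw [if_neg hy, hcnt y, List.count_cons_of_ne (by omega)]
  by_cases h0 : (d.modify x 0 (· - 1)).getD x 0 = 0
  · have hxw : x ∉ w := by
      rw [hg2 x] at h0
      exact List.count_eq_zero.mp (by exact_mod_cast h0)
    simp only [h0, if_pos]
    refine ⟨?_, ?_, ?_⟩
    · rw [keys_erase, hk2]; exact hnd.filter _
    · intro y
      rw [getD_erase]
      by_cases hy : y = x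
      · subst hy; simp [List.count_eq_zero.mpr hxw]
      · simp [hy, hg2 y]
    · intro y
      rw [mem_keys_erase, hk2, hmem y]
      by_cases hy : y = x
      · subst hy; simp [hxw]
      · simp [hy]
  · simp only [h0, if_false]
    have hxw : x ∈ w := by
      rw [hg2 x] at h0
      exact List.count_pos_iff.mp (by omega)
    refine ⟨by rw [hk2]; exact hnd, hg2, ?_⟩
    intro y
    rw [hk2, hmem y, List.mem_cons]
    constructor
    · rintro (rfl | hy); exacts [hxw, hy]
    · intro hy; exact Or.inr hy

lemma win_succ (arr : List Int) (l r : Nat) (hl : l ≤ r) (hr : r < arr.length) :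
    (arr.drop l).take (r - l) ++ [arr[r]] = (arr.drop l).take (r + 1 - l) := by
  have h1 : r + 1 - l = (r - l) + 1 := by omega
  rw [h1, List.take_add_one]
  congr 1
  rw [List.getElem?_drop]
  have h2 : l + (r - l) = r := by omega
  rw [h2, List.getElem?_eq_getElem hr]
  rfl

lemma win_cons (arr : List Int) (l n : Nat) (hl : l < arr.length) :
    (arr.drop l).take (n + 1) = arr[l] :: (arr.drop (l + 1)).take n := by
  rw [List.drop_eq_getElem_cons hl, List.take_succ_cons]

-- main loop characterisation for k ≥ 1
lemma go_spec (arr : List Int) (k : Int) (hk : 1 ≤ k) :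
    ∀ n r l d, arr.length - r = n → l ≤ r → r ≤ arr.length →
    ((r : Int) - (l : Int) = min (r : Int) (k - 1)) →
    DInv d ((arr.drop l).take (r - l)) →
    (bestsellerGo arr k l r d = true ↔
      ∃ i : Nat, l ≤ i ∧ (i : Int) + k ≤ (arr.length : Int) ∧ ((arr.drop i).take k.toNat).Nodup) := by
  intro n
  induction n using Nat.strong_induction_on with
  | _ n ih =>
    intro r l d hn hlr hrlen hmin hinv
    rw [bestsellerGo]
    by_cases h : r < arr.length
    · rw [dif_pos h]
      have hxr : PySem.List.pyGetD arr (r : Int) 0 = arr[r] := by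
        rw [PySem.List.pyGetD_natCast, List.getD_eq_getElem arr 0 h]
      rw [hxr]
      have hpush : DInv (d.modify (arr[r]) 0 (· + 1))
          ((arr.drop l).take (r + 1 - l)) := by
        have h1 := DInv_push d _ (arr[r]) hinv
        rwa [win_succ arr l r hlr h] at h1
      by_cases hc : ((r : Int) + 1) - (l : Int) = k
      · rw [if_pos hc]
        have hrl1 : r + 1 - l = k.toNat := by omega
        have hkeys := keys_length_of_DInv _ _ hpush
        by_cases hkk : (((d.modify (arr[r]) 0 (· + 1)).keys.length : Int)) = k
        · rw [if_pos hkk]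
          simp only [true_iff]
          refine ⟨l, Nat.le_refl l, by omega, ?_⟩
          apply (ofList_length_eq_iff _).mp
          rw [← hrl1, ← hkeys]
          rw [List.length_take, List.length_drop]
          omega
        · rw [if_neg hkk]
          have hlw : l < arr.length := by omega
          have hxl : PySem.List.pyGetD arr (l : Int) 0 = arr[l] := by
            rw [PySem.List.pyGetD_natCast, List.getD_eq_getElem arr 0 hlw]
          have hnotnodup : ¬ ((arr.drop l).take k.toNat).Nodup := by
            intro hnd
            apply hkk
            rw [hkeys, PySem.Set.ofList_eq_self_of_nodup _ (by rwa [hrl1])]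
            rw [List.length_take, List.length_drop]
            push_cast
            omega
          have hw1cons : (arr.drop l).take (r + 1 - l)
              = arr[l] :: ((arr.drop (l + 1)).take (r - l)) := by
            have h2 : r + 1 - l = (r - l) + 1 := by omega
            rw [h2, win_cons arr l (r - l) hlw]
          rw [hxl]
          have hpop := DInv_pop (d.modify (arr[r]) 0 (· + 1))
            ((arr.drop (l + 1)).take (r - l)) (arr[l]) (by rwa [hw1cons] at hpush)
          have hrec := ih (arr.length - (r + 1)) (by omega) (r + 1) (l + 1) _ rfl
            (by omega) (by omega) (by push_cast at hc ⊢; omega)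
            (by
              have h3 : r + 1 - (l + 1) = r - l := by omega
              rw [h3]
              exact hpop)
          rw [hrec]
          constructor
          · rintro ⟨i, hli, hik, hnd⟩
            exact ⟨i, by omega, hik, hnd⟩
          · rintro ⟨i, hli, hik, hnd⟩
            rcases Nat.eq_or_lt_of_le hli with rfl | hlt
            · exact absurd hnd hnotnodup
            · exact ⟨i, by omega, hik, hnd⟩
      · rw [if_neg hc]
        exact ih (arr.length - (r + 1)) (by omega) (r + 1) l _ rfl (by omega) (by omega)
          (by push_cast at hmin hc ⊢; omega) hpush
    · rw [dif_neg h]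
      simp only [Bool.false_eq_true, false_iff]
      rintro ⟨i, hli, hik, -⟩
      have hr : r = arr.length := by omega
      subst hr
      omega

lemma go_nonpos (arr : List Int) (k : Int) (hk : k ≤ 0) :
    ∀ n r l d, arr.length - r = n → l ≤ r → bestsellerGo arr k l r d = false := by
  intro n
  induction n using Nat.strong_induction_on with
  | _ n ih =>
    intro r l d hn hlr
    rw [bestsellerGo]
    by_cases h : r < arr.length
    · rw [dif_pos h]
      have hcond : ¬ (((r : Int) + 1) - (l : Int) = k) := by omega
      simp only [hcond, if_false]
      exact ih (arr.length - (r + 1)) (by omega) (r + 1) l _ rfl (by omega)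
    · rw [dif_neg h]

lemma alt_spec (arr : List Int) (k : Int) (hk : 1 ≤ k) :
    (bestseller_alt arr k = true ↔
      ∃ i : Nat, (i : Int) + k ≤ (arr.length : Int) ∧ ((arr.drop i).take k.toNat).Nodup) := by
  unfold bestseller_alt
  rw [if_neg (by omega)]
  rw [List.any_eq_true]
  constructor
  · rintro ⟨i, hmem, hp⟩
    obtain ⟨hi0, hilt⟩ := PySem.List.mem_pyRange_one.mp hmem
    refine ⟨i.toNat, by omega, ?_⟩
    rw [beq_iff_eq] at hp
    rw [PySem.List.slice_toNat arr hi0 (by omega)] at hp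
    have hkn : (i + k).toNat - i.toNat = k.toNat := by omega
    rw [hkn] at hp
    have hlen : ((arr.drop i.toNat).take k.toNat).length = k.toNat := by
      rw [List.length_take, List.length_drop]
      omega
    have : (PySem.Set.ofList ((arr.drop i.toNat).take k.toNat)).length
        = ((arr.drop i.toNat).take k.toNat).length := by
      rw [hlen]; omega
    exact (ofList_length_eq_iff _).mp this
  · rintro ⟨i, hik, hnd⟩
    refine ⟨(i : Int), PySem.List.mem_pyRange_one.mpr ⟨by omega, by omega⟩, ?_⟩
    rw [beq_iff_eq]
    rw [PySem.List.slice_toNat arr (by omega) (by omega)]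
    have hkn : ((i : Int) + k).toNat - (i : Int).toNat = k.toNat := by omega
    rw [hkn, Int.toNat_natCast]
    rw [PySem.Set.ofList_eq_self_of_nodup _ hnd]
    rw [List.length_take, List.length_drop]
    omega

-- ===== VERDICT (by name: the statement is the Claim_ definition above) =====
theorem bestseller_spec : Claim_equal_bestseller := by
  intro arr k _
  unfold Spec_bestseller
  by_cases hk : k ≤ 0
  · have hA : bestseller arr k = false := by
      unfold bestseller
      exact go_nonpos arr k hk arr.length 0 0 PySem.Dict.empty rfl (Nat.le_refl 0)
    have hB : bestseller_alt arr k = false := by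
      unfold bestseller_alt; simp [hk]
    rw [hA, hB]
  · have hk1 : 1 ≤ k := by omega
    have hinv : DInv PySem.Dict.empty ((arr.drop 0).take 0) := by
      refine ⟨?_, ?_, ?_⟩ <;> simp [PySem.Dict.keys, PySem.Dict.empty, PySem.Dict.getD,
        PySem.Dict.get?]
    have hA := go_spec arr k hk1 arr.length 0 0 PySem.Dict.empty rfl (Nat.le_refl 0)
      (Nat.zero_le _) (by simp; omega) hinv
    have hB := alt_spec arr k hk1
    have : bestseller arr k = true ↔ bestseller_alt arr k = true := by
      unfold bestseller
      rw [hA, hB]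
      constructor
      · rintro ⟨i, _, hi⟩; exact ⟨i, hi⟩
      · rintro ⟨i, hi⟩; exact ⟨i, Nat.zero_le i, hi⟩
    exact Bool.coe_iff_coe.mp this
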